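-- pv_equiv track=rewrite | github.com/CHANCHALCHAVHAN/Company_Problem-statement-and-its-Solutions | Phantom Subset Mirrors.py | count_phantom_subset_mirrors
-- ===== SOURCE A (Python) =====
-- from itertools import combinations
--
-- def count_phantom_subset_mirrors(A):
--     N = len(A)
--     count = 0
--
--     # Generate all subsets of indices of size >= 2
--     for size in range(2, N + 1):
--         for indices in combinations(range(N), size):
--             B = [A[i] for i in indices]
--             B_rev = B[::-1]
--             D = [b - br for b, br in zip(B, B_rev)]
--
--             # Compute prefix sums
--             prefix_sum = []
--             current = 0
--             for d in D:
--                 current += d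
--                 prefix_sum.append(current)
--
--             # Check if prefix sums are strictly increasing
--             if all(prefix_sum[i] < prefix_sum[i + 1] for i in range(len(prefix_sum) - 1)):
--                 count += 1
--
--     return count
-- ===== SOURCE B (Python) =====
-- def count_phantom_subset_mirrors(A):
--     # Mirror-difference prefix sums can only strictly increase for subsets of
--     # size exactly 2 with B[0] < B[1], so just count pairs i < j with A[i] < A[j].
--     count = 0
--     rest = A
--     while rest:
--         x, rest = rest[0], rest[1:]
--         count += sum(1 for y in rest if x < y)
--     return count
-- ===== Notes on version B (the rewrite author's own statement) =====
-- stated objective: faster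
-- what changed: A enumerates every subset of size >= 2 and tests its mirror-difference prefix sums; B uses the fact that only 2-element subsets with A[i] < A[j] can pass the test, and counts those pairs with a single pass over suffixes.
import Mathlib
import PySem

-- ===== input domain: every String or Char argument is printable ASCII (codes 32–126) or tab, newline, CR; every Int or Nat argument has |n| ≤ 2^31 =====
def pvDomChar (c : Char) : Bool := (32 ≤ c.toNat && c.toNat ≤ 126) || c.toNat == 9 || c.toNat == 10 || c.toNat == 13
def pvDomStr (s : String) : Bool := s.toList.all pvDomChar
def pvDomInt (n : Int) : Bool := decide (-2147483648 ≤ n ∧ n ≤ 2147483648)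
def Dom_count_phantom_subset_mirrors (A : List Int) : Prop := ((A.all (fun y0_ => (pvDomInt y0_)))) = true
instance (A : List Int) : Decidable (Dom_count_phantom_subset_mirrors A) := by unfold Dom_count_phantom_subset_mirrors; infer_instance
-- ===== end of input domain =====

-- B replaces A's exponential subset enumeration by counting pairs i < j with A[i] < A[j]
-- (the only subsets whose mirror-difference prefix sums strictly increase are such pairs): faster.

-- ===== PORT A =====
-- itertools.combinations(xs, k), in Python's order (lexicographic by index)
def pvCombos {α : Type} : Nat → List α → List (List α)
  | 0, _ => [[]]
  | _ + 1, [] => []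
  | k + 1, x :: xs => ((pvCombos k xs).map (fun c => x :: c)) ++ pvCombos (k + 1) xs

-- the prefix-sum loop: current starts at 0, each sum is appended
def pvPref (D : List Int) : List Int :=
  (D.foldl (fun (acc : List Int × Int) d => (acc.1 ++ [acc.2 + d], acc.2 + d))
    (([] : List Int), (0 : Int))).1

-- all(prefix_sum[i] < prefix_sum[i + 1] for i in range(len(prefix_sum) - 1))
def pvAllInc (P : List Int) : Bool :=
  (List.range (P.length - 1)).all (fun i => decide (P.getD i 0 < P.getD (i + 1) 0))

-- the loop body on B: B_rev = B[::-1] (reverse, PySem.List.slice?_none_none_neg_one), D, then the check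
def pvCheck (B : List Int) : Bool :=
  pvAllInc (pvPref (List.zipWith (fun b br => b - br) B B.reverse))

def count_phantom_subset_mirrors (A : List Int) : Int :=
  let N := A.length
  (PySem.List.pyRange 2 ((N : Int) + 1)).foldl (fun count size =>
    (pvCombos size.toNat (List.range N)).foldl (fun count idxs =>
      if pvCheck (idxs.map (fun i => A.getD i 0)) then count + 1 else count) count) 0

-- ===== PORT B =====
-- the while loop: pop the head, add the number of larger later elements
def pvAltGo : List Int → Int → Int
  | [], count => count
  | x :: rest, count => pvAltGo rest (count + ((rest.countP (fun y => decide (x < y)) : Nat) : Int))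

def count_phantom_subset_mirrors_alt (A : List Int) : Int := pvAltGo A 0

-- ===== PRECONDITION & SPEC =====
def Spec_count_phantom_subset_mirrors (A : List Int) (out : Int) : Prop := out = count_phantom_subset_mirrors_alt A
instance (A : List Int) (out : Int) : Decidable (Spec_count_phantom_subset_mirrors A out) := by unfold Spec_count_phantom_subset_mirrors; infer_instance

-- ===== CLAIM (what is proved, stated in full; the proofs are below) =====
def Claim_equal_count_phantom_subset_mirrors : Prop := ∀ (A : List Int), Dom_count_phantom_subset_mirrors A → Spec_count_phantom_subset_mirrors A (count_phantom_subset_mirrors A)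

-- ===== LEMMAS AND PROOFS =====

-- prefix sums of D starting from running total s
def pvPsums (s : Int) : List Int → List Int
  | [] => []
  | d :: D => (s + d) :: pvPsums (s + d) D

theorem pvFoldPref (D : List Int) : ∀ (acc : List Int) (s : Int),
    D.foldl (fun (a : List Int × Int) d => (a.1 ++ [a.2 + d], a.2 + d)) (acc, s)
      = (acc ++ pvPsums s D, s + D.sum) := by
  induction D with
  | nil => intro acc s; simp [pvPsums]
  | cons d D ih =>
      intro acc s
      simp only [List.foldl_cons, ih, pvPsums, List.sum_cons, Prod.mk.injEq]
      exact ⟨by simp, by ring⟩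

theorem pvPsumsChain (D : List Int) : ∀ s : Int,
    List.IsChain (· < ·) (pvPsums s D) ↔ ∀ d ∈ D.drop 1, 0 < d := by
  induction D with
  | nil => intro s; simp [pvPsums]
  | cons d D ih =>
      intro s
      cases D with
      | nil => simp [pvPsums]
      | cons d2 D2 =>
          have h := ih (s + d)
          simp only [pvPsums, List.drop_one, List.tail_cons] at h ⊢
          rw [List.isChain_cons_cons, h]
          simp only [List.forall_mem_cons]
          constructor
          · rintro ⟨h1, h2⟩; exact ⟨by omega, h2⟩
          · rintro ⟨h1, h2⟩; exact ⟨by omega, h2⟩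

theorem pvAllChain (P : List Int) :
    pvAllInc P = true ↔ List.IsChain (· < ·) P := by
  unfold pvAllInc
  rw [List.isChain_iff_getElem]
  simp only [List.all_eq_true, List.mem_range, decide_eq_true_eq]
  constructor
  · intro h i hi
    have := h i (by omega)
    rwa [List.getD_eq_getElem _ _ (by omega), List.getD_eq_getElem _ _ (by omega)] at this
  · intro h i hi
    rw [List.getD_eq_getElem _ _ (by omega), List.getD_eq_getElem _ _ (by omega)]
    exact h i (by omega)

theorem pvCheckIff (B : List Int) :
    pvCheck B = true ↔ ∀ d ∈ (List.zipWith (fun b br => b - br) B B.reverse).drop 1, 0 < d := by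
  unfold pvCheck pvPref
  rw [pvFoldPref]
  simp only [List.nil_append]
  rw [pvAllChain, pvPsumsChain]

theorem pvCheckTwo (a b : Int) : pvCheck [a, b] = decide (a < b) := by
  have hD : (List.zipWith (fun x y => x - y) [a, b] ([a, b].reverse)).drop 1 = [b - a] := rfl
  have hiff := pvCheckIff [a, b]
  rw [hD] at hiff
  by_cases h : a < b
  · have ht : pvCheck [a, b] = true := hiff.mpr (by intro d hd; simp at hd; omega)
    simp [ht, h]
  · have hf : pvCheck [a, b] ≠ true := fun hc => by
      have := hiff.mp hc (b - a) (by simp)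
      omega
    simp only [Bool.not_eq_true] at hf
    simp [hf, h]

theorem pvCheckLong (B : List Int) (h : 3 ≤ B.length) : pvCheck B = false := by
  rw [Bool.eq_false_iff]
  intro hc
  have hall := (pvCheckIff B).mp hc
  have hDlen : (List.zipWith (fun b br => b - br) B B.reverse).length = B.length := by
    simp
  have hdrop : ((List.zipWith (fun b br => b - br) B B.reverse).drop 1).length
      = B.length - 1 := by
    simp
  have e1 : ((List.zipWith (fun b br => b - br) B B.reverse).drop 1)[0]'(by omega)
      = B[1]'(by omega) - B[B.length - 2]'(by omega) := by
    rw [List.getElem_drop, List.getElem_zipWith, List.getElem_reverse]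
    rw [getElem_congr rfl (by omega : 1 + 0 = 1) (by omega),
      getElem_congr rfl (by omega : B.length - 1 - (1 + 0) = B.length - 2) (by omega)]
  have e2 : ((List.zipWith (fun b br => b - br) B B.reverse).drop 1)[B.length - 3]'(by omega)
      = B[B.length - 2]'(by omega) - B[1]'(by omega) := by
    rw [List.getElem_drop, List.getElem_zipWith, List.getElem_reverse]
    rw [getElem_congr rfl (by omega : 1 + (B.length - 3) = B.length - 2) (by omega),
      getElem_congr rfl (by omega : B.length - 1 - (1 + (B.length - 3)) = 1) (by omega)]
  have p1 := hall _ (e1 ▸ List.getElem_mem (by omega))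
  have p2 := hall _ (e2 ▸ List.getElem_mem (by omega))
  omega

theorem pvCombosLen {α : Type} : ∀ (k : Nat) (xs : List α) (c : List α),
    c ∈ pvCombos k xs → c.length = k := by
  intro k xs
  induction xs generalizing k with
  | nil => intro c hc; cases k <;> simp [pvCombos] at hc; simp [hc]
  | cons x xs ih =>
      intro c hc
      cases k with
      | zero => simp [pvCombos] at hc; simp [hc]
      | succ k =>
          simp only [pvCombos, List.mem_append, List.mem_map] at hc
          rcases hc with ⟨c', hc', rfl⟩ | hc
          · simp [ih k c' hc']
          · exact ih (k + 1) c hc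

theorem pvCombosMap {α β : Type} (f : α → β) : ∀ (k : Nat) (xs : List α),
    pvCombos k (xs.map f) = (pvCombos k xs).map (List.map f) := by
  intro k xs
  induction xs generalizing k with
  | nil => cases k <;> simp [pvCombos]
  | cons x xs ih =>
      cases k with
      | zero => simp [pvCombos]
      | succ k =>
          simp only [List.map_cons, pvCombos, ih, List.map_append, List.map_map]
          rfl

theorem pvCombosOne {α : Type} : ∀ (xs : List α), pvCombos 1 xs = xs.map (fun x => [x]) := by
  intro xs
  induction xs with
  | nil => simp [pvCombos]
  | cons x xs ih => simp [pvCombos, ih]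

theorem pvMapRangeGetD (l : List Int) : (List.range l.length).map (fun i => l.getD i 0) = l := by
  apply List.ext_getElem
  · simp
  · intro i h1 h2
    simp only [List.getElem_map, List.getElem_range, List.getD]
    rw [List.getElem?_eq_getElem h2]
    rfl

theorem pvAltGoAcc : ∀ (l : List Int) (c : Int), pvAltGo l c = c + pvAltGo l 0 := by
  intro l
  induction l with
  | nil => intro c; simp [pvAltGo]
  | cons x xs ih =>
      intro c
      simp only [pvAltGo]
      rw [ih, ih (0 + _)]
      ring

theorem pvAltPairs : ∀ (l : List Int),
    pvAltGo l 0 = ((pvCombos 2 l).countP pvCheck : Nat) := by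
  intro l
  induction l with
  | nil => simp [pvAltGo, pvCombos]
  | cons x xs ih =>
      simp only [pvAltGo, pvCombos, pvCombosOne, List.map_map, List.countP_append,
        List.countP_map, zero_add]
      rw [pvAltGoAcc, ih]
      have hcomp : xs.countP (pvCheck ∘ ((fun c => x :: c) ∘ fun y => [y]))
          = xs.countP (fun y => decide (x < y)) := by
        apply List.countP_congr
        intro y _
        simp [Function.comp, pvCheckTwo]
      rw [hcomp]
      push_cast
      ring

theorem pvCntLong (A : List Int) (k : Nat) (hk : 3 ≤ k) :
    (pvCombos k (List.range A.length)).countP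
      (fun idxs => pvCheck (idxs.map (fun i => A.getD i 0))) = 0 := by
  rw [List.countP_eq_zero]
  intro c hc
  have hlen : (c.map (fun i => A.getD i 0)).length = k := by
    rw [List.length_map, pvCombosLen k _ c hc]
  have := pvCheckLong (c.map (fun i => A.getD i 0)) (by omega)
  simp only [Bool.not_eq_true]
  exact this

theorem pvCnt2 (A : List Int) :
    ((pvCombos 2 (List.range A.length)).countP
      (fun idxs => pvCheck (idxs.map (fun i => A.getD i 0))) : Int) = pvAltGo A 0 := by
  have h1 : (pvCombos 2 (List.range A.length)).countP
      (fun idxs => pvCheck (idxs.map (fun i => A.getD i 0)))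
      = (pvCombos 2 ((List.range A.length).map (fun i => A.getD i 0))).countP pvCheck := by
    rw [pvCombosMap, List.countP_map]
    rfl
  rw [h1, pvMapRangeGetD, pvAltPairs]

-- ===== VERDICT (by name: the statement is the Claim_ definition above) =====
theorem count_phantom_subset_mirrors_spec : Claim_equal_count_phantom_subset_mirrors := by
  intro A _
  unfold Spec_count_phantom_subset_mirrors count_phantom_subset_mirrors
    count_phantom_subset_mirrors_alt
  simp only []
  by_cases hsmall : A.length < 2
  · rw [PySem.List.pyRange_one_eq_nil (by omega : ((A.length : Int) + 1) ≤ 2)]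
    simp only [List.foldl_nil]
    match A, hsmall with
    | [], _ => simp [pvAltGo]
    | [x], _ => simp [pvAltGo]
  · have inner : ∀ (c : Int) (k : Nat),
        (pvCombos k (List.range A.length)).foldl (fun count idxs =>
          if pvCheck (idxs.map (fun i => A.getD i 0)) then count + 1 else count) c
        = c + ((pvCombos k (List.range A.length)).countP
            (fun idxs => pvCheck (idxs.map (fun i => A.getD i 0))) : Int) := by
      intro c k
      exact PySem.List.foldl_count_if _ _ c
    rw [PySem.List.pyRange_one_cons (by omega : (2 : Int) < (A.length : Int) + 1)]
    simp only [List.foldl_cons]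
    rw [inner 0 ((2 : Int)).toNat]
    rw [show ((2 : Int)).toNat = 2 from rfl, zero_add, pvCnt2]
    rw [PySem.List.foldl_congr_mem _ _ (fun (count : Int) (_ : Int) => count) _ ?_]
    · exact List.foldl_fixed _
    · intro acc x hx
      have hx3 : (3 : Int) ≤ x := (PySem.List.mem_pyRange_one.mp hx).1
      rw [inner acc x.toNat, pvCntLong A x.toNat (by omega)]
      simp
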